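-- pv_equiv track=rewrite | github.com/darkolol9/personal_algorithm_tools | 49.py | get_artithmitic_subseq_of_len_3
-- ===== SOURCE A (Python) =====
-- def get_artithmitic_subseq_of_len_3(arr):
--     """
--     Returns a list of all the arithmetic subsequence of length 3 in the given array.
--
--     Parameters:
--         arr (list): A list of integers.
--
--     Returns:
--         list: A list of all the arithmetic subsequence of length 3 in the given array.
--     """
--     res = []
--     for i in range(len(arr) - 2):
--         for j in range(i + 1, len(arr) - 1):
--             for k in range(j + 1, len(arr)):
--                 if arr[k] - arr[j] == arr[j] - arr[i]:
--                     res.append([arr[i], arr[j], arr[k]])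
--
--
--     return res
-- ===== SOURCE B (Python) =====
-- def get_artithmitic_subseq_of_len_3(arr):
--     n = len(arr)
--     res = []
--     for i in range(n - 2):
--         suffix = {}
--         for x in arr[i + 2:]:
--             suffix[x] = suffix.get(x, 0) + 1
--         for j in range(i + 1, n - 1):
--             t = 2 * arr[j] - arr[i]
--             cnt = suffix.get(t, 0)
--             res += [[arr[i], arr[j], t]] * cnt
--             suffix[arr[j + 1]] = suffix.get(arr[j + 1], 0) - 1
--     return res
-- ===== Notes on version B (the rewrite author's own statement) =====
-- stated objective: alternative
-- what changed: replaces the innermost k-scan by a running suffix-count dictionary: for each (i,j) the number of valid k is a single dict lookup and the repeated triple [arr[i],arr[j],2*arr[j]-arr[i]] is emitted that many times (intended as faster; measured 3.48x at n=256, unconfirmed at larger sizes where the output itself dominates)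
import Mathlib
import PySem

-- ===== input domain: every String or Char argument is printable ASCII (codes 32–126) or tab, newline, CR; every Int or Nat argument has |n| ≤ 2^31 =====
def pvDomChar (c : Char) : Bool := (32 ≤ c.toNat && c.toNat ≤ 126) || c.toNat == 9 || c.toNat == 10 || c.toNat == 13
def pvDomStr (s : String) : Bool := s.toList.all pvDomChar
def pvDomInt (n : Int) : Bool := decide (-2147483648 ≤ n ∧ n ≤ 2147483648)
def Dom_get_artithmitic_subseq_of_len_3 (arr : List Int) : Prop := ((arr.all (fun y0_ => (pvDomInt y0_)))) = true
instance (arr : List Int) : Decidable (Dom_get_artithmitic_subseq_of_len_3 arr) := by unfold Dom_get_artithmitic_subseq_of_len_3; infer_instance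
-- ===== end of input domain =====

-- B replaces A's innermost k-scan by a running suffix-count dictionary: one lookup per (i,j) pair.

-- ===== PORT A =====
-- literal transliteration of A's three nested index loops with conditional append
def get_artithmitic_subseq_of_len_3 (arr : List Int) : List (List Int) :=
  (PySem.List.pyRange 0 ((arr.length : Int) - 2) 1).foldl (fun res i =>
    (PySem.List.pyRange (i + 1) ((arr.length : Int) - 1) 1).foldl (fun res j =>
      (PySem.List.pyRange (j + 1) (arr.length : Int) 1).foldl (fun res k =>
        if PySem.List.pyGetD arr k 0 - PySem.List.pyGetD arr j 0 ==
           PySem.List.pyGetD arr j 0 - PySem.List.pyGetD arr i 0 then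
          res ++ [[PySem.List.pyGetD arr i 0, PySem.List.pyGetD arr j 0, PySem.List.pyGetD arr k 0]]
        else res) res) res) []

-- ===== PORT B =====
-- literal transliteration of Source B: per i build a dict counting arr[i+2:], then for each j
-- look up 2*arr[j]-arr[i], emit that many copies of the triple, and decrement arr[j+1]
def get_artithmitic_subseq_of_len_3_alt (arr : List Int) : List (List Int) :=
  let n : Int := arr.length
  (PySem.List.pyRange 0 (n - 2) 1).foldl (fun res i =>
    let suffix : PySem.Dict Int Int :=
      (PySem.List.slice arr (some (i + 2)) none).foldl
        (fun d x => d.insert x (d.getD x 0 + 1)) PySem.Dict.empty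
    ((PySem.List.pyRange (i + 1) (n - 1) 1).foldl
      (fun (st : List (List Int) × PySem.Dict Int Int) j =>
        let t := 2 * PySem.List.pyGetD arr j 0 - PySem.List.pyGetD arr i 0
        let cnt := st.2.getD t 0
        let res := st.1 ++ List.replicate cnt.toNat [PySem.List.pyGetD arr i 0, PySem.List.pyGetD arr j 0, t]
        let d := st.2.insert (PySem.List.pyGetD arr (j + 1) 0) (st.2.getD (PySem.List.pyGetD arr (j + 1) 0) 0 - 1)
        (res, d)) (res, suffix)).1) []

-- ===== PRECONDITION & SPEC =====
def Spec_get_artithmitic_subseq_of_len_3 (arr : List Int) (out : List (List Int)) : Prop := out = get_artithmitic_subseq_of_len_3_alt arr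
instance (arr : List Int) (out : List (List Int)) : Decidable (Spec_get_artithmitic_subseq_of_len_3 arr out) := by unfold Spec_get_artithmitic_subseq_of_len_3; infer_instance

-- ===== CLAIM (what is proved, stated in full; the proofs are below) =====
def Claim_equal_get_artithmitic_subseq_of_len_3 : Prop := ∀ (arr : List Int), Dom_get_artithmitic_subseq_of_len_3 arr → Spec_get_artithmitic_subseq_of_len_3 arr (get_artithmitic_subseq_of_len_3 arr)

-- ===== LEMMAS AND PROOFS =====

-- A's innermost loop appends the constant triple once per occurrence of the target value
lemma pv_innerA (x y : Int) : ∀ (l : List Int) (res : List (List Int)),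
    l.foldl (fun res v => if v - y == y - x then res ++ [[x, y, v]] else res) res
      = res ++ List.replicate (l.count (2 * y - x)) [x, y, 2 * y - x] := by
  intro l
  induction l with
  | nil => intro res; simp
  | cons v l ih =>
    intro res
    simp only [List.foldl_cons, List.count_cons]
    by_cases h : v = 2 * y - x
    · have hb : (v - y == y - x) = true := by subst h; simp; ring
      rw [hb, if_pos rfl, ih]
      subst h
      simp [List.append_assoc]
      rw [List.replicate_succ]
    · have hb : (v - y == y - x) = false := by
        simp only [beq_eq_false_iff_ne, ne_eq]; omega
      rw [hb]
      simp only [Bool.false_eq_true, if_false, ih]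
      simp [h]

lemma pv_buildCount : ∀ (l : List Int) (d : PySem.Dict Int Int) (v : Int),
    ((l.foldl (fun d x => d.insert x (d.getD x 0 + 1)) d).getD v 0)
      = d.getD v 0 + (l.count v : Int) := by
  intro l
  induction l with
  | nil => intro d v; simp
  | cons x l ih =>
    intro d v
    simp only [List.foldl_cons, List.count_cons, ih, PySem.Dict.getD_insert]
    by_cases h : v = x
    · simp [h]; omega
    · have h' : x ≠ v := fun hh => h hh.symm
      simp [h, h']

-- the j-loop of B, run with a dict that counts arr[j+1:], produces A's j-loop result
lemma pv_middle (arr : List Int) (x : Int) :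
    ∀ (m : Nat) (s : Int), 0 ≤ s → ((arr.length : Int) - 1 - s).toNat = m →
    ∀ (res : List (List Int)) (d : PySem.Dict Int Int),
    (∀ v, d.getD v 0 = (((arr.drop (s + 1).toNat).count v : Nat) : Int)) →
    ((PySem.List.pyRange s ((arr.length : Int) - 1) 1).foldl
      (fun (st : List (List Int) × PySem.Dict Int Int) j =>
        let t := 2 * PySem.List.pyGetD arr j 0 - PySem.List.pyGetD arr x.toNat 0
        let cnt := st.2.getD t 0
        let res := st.1 ++ List.replicate cnt.toNat [PySem.List.pyGetD arr x.toNat 0, PySem.List.pyGetD arr j 0, t]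
        let d := st.2.insert (PySem.List.pyGetD arr (j + 1) 0) (st.2.getD (PySem.List.pyGetD arr (j + 1) 0) 0 - 1)
        (res, d)) (res, d)).1
    = (PySem.List.pyRange s ((arr.length : Int) - 1) 1).foldl (fun res j =>
        (PySem.List.pyRange (j + 1) (arr.length : Int) 1).foldl (fun res k =>
          if PySem.List.pyGetD arr k 0 - PySem.List.pyGetD arr j 0 ==
             PySem.List.pyGetD arr j 0 - PySem.List.pyGetD arr x.toNat 0 then
            res ++ [[PySem.List.pyGetD arr x.toNat 0, PySem.List.pyGetD arr j 0, PySem.List.pyGetD arr k 0]]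
          else res) res) res := by
  intro m
  induction m with
  | zero =>
    intro s hs hm res d hd
    rw [PySem.List.pyRange_one_eq_nil (by omega)]
    simp
  | succ m ih =>
    intro s hs hm res d hd
    have hlt : s < (arr.length : Int) - 1 := by omega
    rw [PySem.List.pyRange_one_cons hlt]
    simp only [List.foldl_cons]
    -- inner k-loop of A at j = s
    have hA : (PySem.List.pyRange (s + 1) (arr.length : Int) 1).foldl (fun res k =>
          if PySem.List.pyGetD arr k 0 - PySem.List.pyGetD arr s 0 ==
             PySem.List.pyGetD arr s 0 - PySem.List.pyGetD arr x.toNat 0 then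
            res ++ [[PySem.List.pyGetD arr x.toNat 0, PySem.List.pyGetD arr s 0, PySem.List.pyGetD arr k 0]]
          else res) res
        = res ++ List.replicate ((arr.drop (s + 1).toNat).count
            (2 * PySem.List.pyGetD arr s 0 - PySem.List.pyGetD arr x.toNat 0))
            [PySem.List.pyGetD arr x.toNat 0, PySem.List.pyGetD arr s 0,
             2 * PySem.List.pyGetD arr s 0 - PySem.List.pyGetD arr x.toNat 0] := by
      rw [PySem.List.foldl_pyRange_pyGetD' arr 0
        (fun res v => if v - PySem.List.pyGetD arr s 0 ==
             PySem.List.pyGetD arr s 0 - PySem.List.pyGetD arr x.toNat 0 then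
            res ++ [[PySem.List.pyGetD arr x.toNat 0, PySem.List.pyGetD arr s 0, v]] else res)
        res (by omega)]
      exact pv_innerA _ _ _ _
    rw [hA]
    have hcnt := hd (2 * PySem.List.pyGetD arr s 0 - PySem.List.pyGetD arr x.toNat 0)
    have hsn : (s + 1).toNat < arr.length := by omega
    have hdrop : arr.drop (s + 1).toNat
        = arr[(s + 1).toNat] :: arr.drop ((s + 1).toNat + 1) :=
      List.drop_eq_getElem_cons hsn
    have hget : PySem.List.pyGetD arr (s + 1) 0 = arr[(s + 1).toNat] :=
      PySem.List.pyGetD_eq_getElem arr 0 (by omega) (by omega)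
    have h2 : (s + 1 + 1).toNat = (s + 1).toNat + 1 := by omega
    refine (ih (s + 1) (by omega) (by omega) _ _ ?_).trans ?_
    · -- dict invariant after the decrement
      intro v
      simp only [PySem.Dict.getD_insert]
      by_cases hv : v = PySem.List.pyGetD arr (s + 1) 0
      · rw [if_pos hv, hv, hd (PySem.List.pyGetD arr (s + 1) 0), h2, hget, hdrop,
            List.count_cons]
        simp only [beq_self_eq_true, if_true]
        push_cast
        omega
      · rw [if_neg hv, hd v, h2, hdrop, List.count_cons]
        have hne : (arr[(s + 1).toNat] == v) = false := by
          simp only [beq_eq_false_iff_ne, ne_eq]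
          rw [← hget]
          exact fun hh => hv hh.symm
        rw [hne]
        simp
    · -- the emitted segments agree
      congr 2
      rw [hcnt]
      simp

-- the dict built from arr[i+2:] initially counts arr[(i+1)+1:]
lemma pv_init_dict (arr : List Int) (i : Int) (hi : 0 ≤ i) (v : Int) :
    (((PySem.List.slice arr (some (i + 2)) none).foldl
        (fun d x => d.insert x (d.getD x 0 + 1)) PySem.Dict.empty).getD v 0)
      = (((arr.drop (i + 1 + 1).toNat).count v : Nat) : Int) := by
  rw [PySem.List.slice_from arr (by omega), pv_buildCount]
  have : (i + 2).toNat = (i + 1 + 1).toNat := by omega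
  rw [this]
  simp

-- ===== VERDICT (by name: the statement is the Claim_ definition above) =====
theorem get_artithmitic_subseq_of_len_3_spec : Claim_equal_get_artithmitic_subseq_of_len_3 := by
  unfold Claim_equal_get_artithmitic_subseq_of_len_3 Spec_get_artithmitic_subseq_of_len_3
  intro arr _
  unfold get_artithmitic_subseq_of_len_3 get_artithmitic_subseq_of_len_3_alt
  apply Eq.symm
  apply PySem.List.foldl_congr_mem
  intro res i hi
  have hi0 : 0 ≤ i := (PySem.List.mem_pyRange_one.mp hi).1
  have hix : (i.toNat : Int) = i := by omega
  have h := pv_middle arr i (((arr.length : Int) - 1 - (i + 1)).toNat) (i + 1) (by omega) rfl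
    res _ (fun v => pv_init_dict arr i hi0 v)
  rw [hix] at h
  exact h
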